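-- pv_equiv track=rewrite | github.com/chaseruskin/orbit | tools/autocl.py | extract_recent_version_changes
-- ===== SOURCE A (Python) =====
-- from typing import List
--
-- def extract_recent_version_changes(contents: List[str]) -> str:
--     '''Returns the information about the changes for the top-listed version.'''
--     info = ''
--     recording = False
--     for line in contents:
--         if line.startswith('## '):
--             recording = not recording
--             if recording == False:
--                 break
--         elif recording == True:
--             info += line
--     info = info.strip()
--     return info
-- ===== SOURCE B (Python) =====
-- def extract_recent_version_changes(contents):
--     '''Returns the information about the changes for the top-listed version.'''
--     idxs = [i for i, line in enumerate(contents) if line.startswith('## ')]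
--     if not idxs:
--         return ''
--     start = idxs[0] + 1
--     end = idxs[1] if len(idxs) > 1 else len(contents)
--     return ''.join(contents[start:end]).strip()
-- ===== Notes on version B (the rewrite author's own statement) =====
-- stated objective: simpler
-- what changed: Replaces the stateful toggle-flag accumulator loop (with break) by building the list of header-line indices once and returning the joined, stripped slice between the first header and the second header (or the end).
import Mathlib
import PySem

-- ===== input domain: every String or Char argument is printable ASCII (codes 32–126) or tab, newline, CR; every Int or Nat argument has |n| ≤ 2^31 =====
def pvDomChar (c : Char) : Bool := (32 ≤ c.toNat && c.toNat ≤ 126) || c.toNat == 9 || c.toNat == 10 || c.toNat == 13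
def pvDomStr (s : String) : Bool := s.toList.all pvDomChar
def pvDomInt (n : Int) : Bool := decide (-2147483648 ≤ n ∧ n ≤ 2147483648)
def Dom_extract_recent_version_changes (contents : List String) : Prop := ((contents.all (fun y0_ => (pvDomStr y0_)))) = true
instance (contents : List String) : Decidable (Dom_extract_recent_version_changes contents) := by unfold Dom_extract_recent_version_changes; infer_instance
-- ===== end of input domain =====

-- B replaces A's toggle-flag accumulator loop by an index-building pass plus a slice-join-strip; same cost, simpler.

-- ===== PORT A =====
-- the for-loop of A with its (info, recording) state and its break, as structural recursion
def pvGoA : List String → List Char → Bool → String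
  | [], info, _ => String.ofList (PySem.Chars.strip info)
  | line :: rest, info, recording =>
    if PySem.Str.startswith line "## " then
      if recording then String.ofList (PySem.Chars.strip info)   -- recording toggles to False: break, then strip
      else pvGoA rest info true
    else if recording then pvGoA rest (info ++ line.toList) recording
    else pvGoA rest info recording

def extract_recent_version_changes (contents : List String) : String :=
  pvGoA contents [] false

-- ===== PORT B =====
def extract_recent_version_changes_alt (contents : List String) : String :=
  let idxs := ((PySem.List.enumerate contents 0).filter (fun p => PySem.Str.startswith p.2 "## ")).map (·.1)
  match idxs with
  | [] => ""
  | i :: rest_idxs =>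
    let start := i + 1
    let stop : Int := match rest_idxs with | [] => (contents.length : Int) | j :: _ => j
    PySem.Str.strip (PySem.Str.join "" (PySem.List.slice contents (some start) (some stop)))

-- ===== PRECONDITION & SPEC =====
def Spec_extract_recent_version_changes (contents : List String) (out : String) : Prop := out = extract_recent_version_changes_alt contents
instance (contents : List String) (out : String) : Decidable (Spec_extract_recent_version_changes contents out) := by unfold Spec_extract_recent_version_changes; infer_instance

-- ===== CLAIM (what is proved, stated in full; the proofs are below) =====
def Claim_equal_extract_recent_version_changes : Prop := ∀ (contents : List String), Dom_extract_recent_version_changes contents → Spec_extract_recent_version_changes contents (extract_recent_version_changes contents)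

-- ===== LEMMAS AND PROOFS =====

-- abbreviation used only by the proofs
def pvHdr (l : String) : Bool := PySem.Str.startswith l "## "

-- A skips non-header lines while not recording
theorem pvGoA_skip (pre : List String) (rest : List String) (info : List Char)
    (h : ∀ l ∈ pre, pvHdr l = false) :
    pvGoA (pre ++ rest) info false = pvGoA rest info false := by
  induction pre with
  | nil => rfl
  | cons x t ih =>
    have hx : pvHdr x = false := h x (List.mem_cons_self ..)
    simp only [List.cons_append, pvGoA]
    rw [show PySem.Str.startswith x "## " = false from hx]
    simpa using ih (fun l hl => h l (List.mem_cons_of_mem _ hl))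

-- while recording A accumulates exactly the lines up to the next header (or the end), then strips
theorem pvGoA_rec (rest : List String) (info : List Char) :
    pvGoA rest info true =
      String.ofList (PySem.Chars.strip (info ++ ((rest.takeWhile (fun l => !pvHdr l)).map String.toList).flatten)) := by
  induction rest generalizing info with
  | nil => simp [pvGoA]
  | cons x t ih =>
    by_cases hx : pvHdr x = true
    · simp only [pvGoA, List.takeWhile_cons, hx]
      rw [show PySem.Str.startswith x "## " = true from hx]
      simp
    · have hx' : pvHdr x = false := by simpa using hx
      simp only [pvGoA, List.takeWhile_cons, hx']
      rw [show PySem.Str.startswith x "## " = false from hx']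
      simp [ih, List.append_assoc]

-- if nothing is a header, A never records and returns the stripped empty string
theorem pvGoA_none (xs : List String) (info : List Char)
    (h : ∀ l ∈ xs, pvHdr l = false) :
    pvGoA xs info false = String.ofList (PySem.Chars.strip info) := by
  induction xs with
  | nil => rfl
  | cons x t ih =>
    have hx : pvHdr x = false := h x (List.mem_cons_self ..)
    simp only [pvGoA]
    rw [show PySem.Str.startswith x "## " = false from hx]
    simpa using ih (fun l hl => h l (List.mem_cons_of_mem _ hl))

-- every list is either header-free or splits at its first header
theorem pvSplit (xs : List String) :
    (∀ l ∈ xs, pvHdr l = false) ∨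
    ∃ pre h rest, xs = pre ++ h :: rest ∧ (∀ l ∈ pre, pvHdr l = false) ∧ pvHdr h = true := by
  induction xs with
  | nil => exact Or.inl (by simp)
  | cons x t ih =>
    by_cases hx : pvHdr x = true
    · exact Or.inr ⟨[], x, t, by simp, by simp, hx⟩
    · have hx' : pvHdr x = false := by simpa using hx
      rcases ih with h | ⟨pre, hd, rest, rfl, hpre, hh⟩
      · refine Or.inl ?_
        intro l hl
        rcases List.mem_cons.mp hl with rfl | hl
        · exact hx'
        · exact h l hl
      · refine Or.inr ⟨x :: pre, hd, rest, by simp, ?_, hh⟩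
        intro l hl
        rcases List.mem_cons.mp hl with rfl | hl
        · exact hx'
        · exact hpre l hl

-- no header-free line survives the filter
theorem pvFilter_none (pre : List String) (s : Int)
    (h : ∀ l ∈ pre, pvHdr l = false) :
    (PySem.List.enumerate pre s).filter (fun p => PySem.Str.startswith p.2 "## ") = [] := by
  induction pre generalizing s with
  | nil => simp [PySem.List.enumerate_nil]
  | cons x t ih =>
    have hx : pvHdr x = false := h x (List.mem_cons_self ..)
    rw [PySem.List.enumerate_cons]
    simp only [List.filter_cons]
    rw [show PySem.Str.startswith x "## " = false from hx]
    simpa using ih (s + 1) (fun l hl => h l (List.mem_cons_of_mem _ hl))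

-- joining with the empty separator is concatenation
theorem pvJoin_nil (L : List (List Char)) : PySem.Chars.join [] L = L.flatten := by
  induction L with
  | nil => simp [PySem.Chars.join_nil]
  | cons a t ih =>
    cases t with
    | nil => simp [PySem.Chars.join_singleton]
    | cons b u => rw [PySem.Chars.join_cons_cons]; simp [ih, List.flatten]

theorem pvTakeWhile_all (xs : List String) (h : ∀ l ∈ xs, pvHdr l = false) :
    xs.takeWhile (fun l => !pvHdr l) = xs := by
  induction xs with
  | nil => rfl
  | cons x t ih =>
    rw [List.takeWhile_cons]
    rw [show pvHdr x = false from h x (List.mem_cons_self ..)]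
    simp [ih (fun l hl => h l (List.mem_cons_of_mem _ hl))]

theorem pvTakeWhile_split (q : List String) (h2 : String) (t : List String)
    (hq : ∀ l ∈ q, pvHdr l = false) (hh : pvHdr h2 = true) :
    (q ++ h2 :: t).takeWhile (fun l => !pvHdr l) = q := by
  induction q with
  | nil => simp [hh]
  | cons x u ih =>
    rw [List.cons_append, List.takeWhile_cons]
    rw [show pvHdr x = false from hq x (List.mem_cons_self ..)]
    simp [ih (fun l hl => hq l (List.mem_cons_of_mem _ hl))]

theorem pvStr (L : List String) :
    PySem.Str.strip (PySem.Str.join "" L) = String.ofList (PySem.Chars.strip (L.map String.toList).flatten) := by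
  have h : (PySem.Str.strip (PySem.Str.join "" L)).toList
      = PySem.Chars.strip ((L.map String.toList).flatten) := by
    rw [PySem.Str.toList_strip, PySem.Str.toList_join]
    rw [show ("" : String).toList = [] from rfl, pvJoin_nil]
  rw [← String.ofList_toList (s := PySem.Str.strip (PySem.Str.join "" L)), h]

-- ===== VERDICT (by name: the statement is the Claim_ definition above) =====
theorem extract_recent_version_changes_spec : Claim_equal_extract_recent_version_changes := by
  intro contents _
  unfold Spec_extract_recent_version_changes extract_recent_version_changes extract_recent_version_changes_alt
  rcases pvSplit contents with hnone | ⟨pre, h, rest, rfl, hpre, hh⟩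
  · rw [pvGoA_none contents [] hnone, pvFilter_none contents 0 hnone]
    rfl
  · -- A side
    rw [pvGoA_skip pre (h :: rest) [] hpre]
    have hA : pvGoA (h :: rest) [] false = pvGoA rest [] true := by
      simp only [pvGoA]
      rw [show PySem.Str.startswith h "## " = true from hh]
      simp
    rw [hA, pvGoA_rec rest []]
    -- B side: compute the index list
    rw [PySem.List.enumerate_append, List.filter_append, pvFilter_none pre 0 hpre]
    rw [PySem.List.enumerate_cons]
    simp only [List.nil_append, List.filter_cons]
    rw [show PySem.Str.startswith h "## " = true from hh]
    simp only [List.nil_append, if_true, List.map_cons]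
    have e1 : (0 + (pre.length : Int) + 1) = ((pre.length + 1 : Nat) : Int) := by push_cast; ring
    rcases pvSplit rest with hr | ⟨q, h2, t, rfl, hq, hh2⟩
    · rw [pvFilter_none rest _ hr, pvTakeWhile_all rest hr]
      simp only [List.map_nil]
      have e2 : (((pre ++ h :: rest).length : Nat) : Int) = ((pre.length + 1 + rest.length : Nat) : Int) := by
        simp; push_cast; ring
      rw [e1, e2, PySem.List.slice_natCast, pvStr]
      have hd : (pre ++ h :: rest).drop (pre.length + 1) = rest := by
        rw [show pre ++ h :: rest = (pre ++ [h]) ++ rest by simp,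
            show pre.length + 1 = (pre ++ [h]).length by simp, List.drop_left]
      rw [hd, show pre.length + 1 + rest.length - (pre.length + 1) = rest.length by omega,
          List.take_length]
    · rw [pvTakeWhile_split q h2 t hq hh2]
      rw [PySem.List.enumerate_append, List.filter_append, pvFilter_none q _ hq,
          PySem.List.enumerate_cons]
      simp only [List.nil_append, List.filter_cons]
      rw [show PySem.Str.startswith h2 "## " = true from hh2]
      simp only [if_true, List.map_cons]
      have e3 : (((pre.length + 1 : Nat) : Int) + (q.length : Int)) = ((pre.length + 1 + q.length : Nat) : Int) := by
        push_cast; ring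
      rw [e1, e3, PySem.List.slice_natCast, pvStr]
      have hd : (pre ++ h :: (q ++ h2 :: t)).drop (pre.length + 1) = q ++ h2 :: t := by
        rw [show pre ++ h :: (q ++ h2 :: t) = (pre ++ [h]) ++ (q ++ h2 :: t) by simp,
            show pre.length + 1 = (pre ++ [h]).length by simp, List.drop_left]
      rw [hd, show pre.length + 1 + q.length - (pre.length + 1) = q.length by omega]
      rw [show (q ++ h2 :: t).take q.length = q from List.take_left]
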